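-- pv_equiv track=rewrite | github.com/ooz34/codingtest-practice | 프로그래머스/1/147355. 크기가 작은 부분문자열/크기가 작은 부분문자열.py | solution
-- ===== SOURCE A (Python) =====
-- def solution(t, p):
--     answer = 0
--     for i in range(len(t)-len(p) + 1):
--         for n, j in enumerate(p):
--             if t[i+n] < j:
--                 answer += 1
--                 break
--             elif t[i+n] > j:
--                 break
--         else:
--             answer += 1
--     return answer
-- ===== SOURCE B (Python) =====
-- def solution(t, p):
--     m = len(p)
--     return sum(t[i:i+m] <= p for i in range(len(t) - m + 1))
-- ===== Notes on version B (the rewrite author's own statement) =====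
-- stated objective: simpler
-- what changed: Replaces A's hand-written digit-by-digit comparison with an explicit break/else inner loop by a one-line sum of direct slice-vs-p string comparisons (windows have p's length, so string order is exactly A's comparison).
import Mathlib
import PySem

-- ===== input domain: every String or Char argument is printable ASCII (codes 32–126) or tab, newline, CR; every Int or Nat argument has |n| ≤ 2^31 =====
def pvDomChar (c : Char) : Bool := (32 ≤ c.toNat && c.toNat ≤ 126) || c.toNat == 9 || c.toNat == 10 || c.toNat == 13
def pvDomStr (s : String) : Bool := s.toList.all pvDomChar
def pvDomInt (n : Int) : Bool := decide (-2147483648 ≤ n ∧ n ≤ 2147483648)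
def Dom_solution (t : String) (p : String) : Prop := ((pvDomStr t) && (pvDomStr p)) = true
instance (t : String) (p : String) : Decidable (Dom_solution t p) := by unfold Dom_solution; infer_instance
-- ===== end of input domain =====

-- B replaces A's hand-written char-by-char compare (break/else inner loop) by summing direct slice-vs-p lexicographic comparisons; objective: simpler.


-- ===== PORT A =====
-- inner 'for n, j in enumerate(p)' loop with break/else: returns the increment (1 on break-at-less
-- or on normal completion, 0 on break-at-greater). t[i+n] is PySem.List.pyGet?; the none branch is
-- Python's IndexError, unreachable here because i+n < len(t) for every i the outer range produces.
def innerA (tl : List Char) (i : Int) : List (Int × Char) → Int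
  | [] => 1
  | (n, j) :: rest =>
    match PySem.List.pyGet? tl (i + n) with
    | none => 0
    | some c => if c < j then 1 else if j < c then 0 else innerA tl i rest

def solution (t : String) (p : String) : Int :=
  (PySem.List.pyRange 0 ((t.toList.length : Int) - (p.toList.length : Int) + 1) 1).foldl
    (fun answer i => answer + innerA t.toList i (PySem.List.enumerate p.toList 0)) 0

-- ===== PORT B =====
-- Python's string '<=' (lexicographic, shorter prefix first), applied to each window slice.
def lexLe : List Char → List Char → Bool
  | [], _ => true
  | _ :: _, [] => false
  | a :: as, b :: bs => if a < b then true else if b < a then false else lexLe as bs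

def solution_alt (t : String) (p : String) : Int :=
  ((PySem.List.pyRange 0 ((t.toList.length : Int) - (p.toList.length : Int) + 1) 1).map
    (fun i => if lexLe (PySem.List.slice t.toList (some i) (some (i + (p.toList.length : Int)))) p.toList
              then (1 : Int) else 0)).sum

-- ===== PRECONDITION & SPEC =====
def Spec_solution (t : String) (p : String) (out : Int) : Prop := out = solution_alt t p
instance (t : String) (p : String) (out : Int) : Decidable (Spec_solution t p out) := by unfold Spec_solution; infer_instance

-- ===== CLAIM (what is proved, stated in full; the proofs are below) =====
def Claim_equal_solution : Prop := ∀ (t : String) (p : String), Dom_solution t p → Spec_solution t p (solution t p)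

-- ===== LEMMAS AND PROOFS =====

-- A's inner loop on the suffix of enumerate(p) starting at index s equals the lexicographic
-- comparison of the corresponding window segment with that suffix of p.
lemma innerA_eq_lexLe (tl : List Char) :
    ∀ (pl : List Char) (i s : Nat), i + s + pl.length ≤ tl.length →
    innerA tl (i : Int) (PySem.List.enumerate pl (s : Int)) =
      if lexLe ((tl.drop (i + s)).take pl.length) pl then 1 else 0 := by
  intro pl
  induction pl with
  | nil =>
    intro i s _
    simp [PySem.List.enumerate, innerA, lexLe]
  | cons j rest ih =>
    intro i s h
    have hlt : i + s < tl.length := by simp at h ⊢; omega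
    have hget : PySem.List.pyGet? tl ((i : Int) + (s : Int)) = some tl[i + s] := by
      have := PySem.List.pyGet?_natCast (xs := tl) (n := i + s)
      push_cast at this ⊢
      rw [this, List.getElem?_eq_getElem hlt]
    have hdrop : tl.drop (i + s) = tl[i + s] :: tl.drop (i + s + 1) :=
      List.drop_eq_getElem_cons hlt
    rw [PySem.List.enumerate_cons]
    simp only [innerA, hget, hdrop, List.length_cons, List.take_succ_cons, lexLe]
    by_cases h1 : tl[i + s] < j
    · simp [h1]
    · by_cases h2 : j < tl[i + s]
      · simp [h1, h2]
      · have heq : tl[i + s] = j := le_antisymm (not_lt.mp h2) (not_lt.mp h1)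
        have hrec := ih i (s + 1) (by simp at h ⊢; omega)
        push_cast at hrec
        simp only [heq]
        rw [hrec]
        have : i + s + 1 = i + (s + 1) := by omega
        simp [this]

lemma solution_eq_alt (t p : String) : solution t p = solution_alt t p := by
  unfold solution solution_alt
  rw [PySem.List.foldl_add]
  rw [zero_add]
  congr 1
  apply List.map_congr_left
  intro x hx
  have hmem := (PySem.List.mem_pyRange_one).mp hx
  obtain ⟨h0, hlt⟩ := hmem
  obtain ⟨n, rfl⟩ := Int.eq_ofNat_of_zero_le h0
  have hb : n + 0 + p.toList.length ≤ t.toList.length := by omega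
  have key := innerA_eq_lexLe t.toList p.toList n 0 hb
  push_cast at key
  simp only [Nat.add_zero] at key
  rw [PySem.List.slice_natCast_add, key]

-- ===== VERDICT (by name: the statement is the Claim_ definition above) =====
theorem solution_spec : Claim_equal_solution := by
  intro t p _
  unfold Spec_solution
  exact solution_eq_alt t p
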